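-- pv_equiv track=rewrite | github.com/pypi-data/pypi-mirror-396 | packages/psevencore/psevencore-2025.12.10-py2.py3-none-manylinux1_x86_64.manylinux_2_5_x86_64.whl/da/p7core_2025_12_10/gtapprox/core_ic.py | _linearize_path
-- ===== SOURCE A (Python) =====
-- def _linearize_path(pairwise_path):
--   segments = [0, ]
--   linear_path = list(pairwise_path[0]) if pairwise_path else []
--
--   for start_idx, stop_idx in pairwise_path[1:]:
--     if start_idx != linear_path[-1]:
--       segments.append(len(linear_path))
--       linear_path.append(start_idx)
--     linear_path.append(stop_idx)
--
--   segments.append(len(linear_path))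
--
--   return linear_path, segments
-- ===== SOURCE B (Python) =====
-- def _linearize_path(pairwise_path):
--     if not pairwise_path:
--         return [], [0, 0]
--     # Pass 1: group the pairs into maximal chained runs (start == previous stop)
--     runs = []
--     cur = [pairwise_path[0]]
--     for p in pairwise_path[1:]:
--         if p[0] == cur[-1][1]:
--             cur.append(p)
--         else:
--             runs.append(cur)
--             cur = [p]
--     runs.append(cur)
--     # Pass 2: flatten each run and record segment boundaries
--     linear = []
--     segments = [0]
--     for run in runs:
--         if linear:
--             segments.append(len(linear))
--         linear.extend(list(run[0]))
--         linear.extend(p[1] for p in run[1:])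
--     segments.append(len(linear))
--     return linear, segments
-- ===== Notes on version B (the rewrite author's own statement) =====
-- stated objective: alternative
-- what changed: A's single interleaved pass maintaining linear_path/segments together is replaced by a grouping pass that splits the pairs into maximal chained runs, followed by a flatten pass that emits each run and records segment boundaries.
import Mathlib
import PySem

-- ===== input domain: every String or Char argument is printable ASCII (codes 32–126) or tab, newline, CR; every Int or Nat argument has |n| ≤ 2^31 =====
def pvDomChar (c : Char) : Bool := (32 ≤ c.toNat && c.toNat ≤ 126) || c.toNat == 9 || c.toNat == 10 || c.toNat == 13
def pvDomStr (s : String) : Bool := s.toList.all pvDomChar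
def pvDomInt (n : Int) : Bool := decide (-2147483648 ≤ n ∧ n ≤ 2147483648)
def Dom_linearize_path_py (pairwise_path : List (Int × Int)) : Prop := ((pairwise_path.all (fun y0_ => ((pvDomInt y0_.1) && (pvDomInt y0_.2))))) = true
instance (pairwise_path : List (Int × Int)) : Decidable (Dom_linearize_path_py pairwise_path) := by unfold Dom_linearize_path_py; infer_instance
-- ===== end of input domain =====

-- B replaces A's single interleaved pass by a grouping pass into maximal chained
-- runs followed by a flatten/boundary pass (objective: alternative decomposition).

-- ===== PORT A =====
-- loop body of A's single pass (state = (linear_path, segments))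
def pvAStep (st : List Int × List Int) (p : Int × Int) : List Int × List Int :=
  let st :=
    if PySem.List.pyGet? st.1 (-1) ≠ some p.1 then
      (st.1 ++ [p.1], st.2 ++ [(st.1.length : Int)])
    else st
  (st.1 ++ [p.2], st.2)

def linearize_path_py (pairwise_path : List (Int × Int)) : List Int × List Int :=
  let linear0 : List Int :=
    match pairwise_path with
    | [] => []
    | (a, b) :: _ => [a, b]
  let st := (pairwise_path.drop 1).foldl pvAStep (linear0, [0])
  (st.1, st.2 ++ [(st.1.length : Int)])

-- ===== PORT B =====
-- pass 1 body: group pairs into maximal chained runs (state = (runs, cur))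
def pvBGroup (st : List (List (Int × Int)) × List (Int × Int)) (p : Int × Int) :
    List (List (Int × Int)) × List (Int × Int) :=
  if some p.1 = st.2.getLast?.map Prod.snd then (st.1, st.2 ++ [p])
  else (st.1 ++ [st.2], [p])

-- pass 2 body: flatten one run and record its boundary
def pvBFlat (st : List Int × List Int) (run : List (Int × Int)) : List Int × List Int :=
  let segments := if st.1 ≠ [] then st.2 ++ [(st.1.length : Int)] else st.2
  let linear := st.1 ++
    (match run with
     | [] => []
     | q :: qs => [q.1, q.2] ++ qs.map Prod.snd)
  (linear, segments)

def linearize_path_py_alt (pairwise_path : List (Int × Int)) : List Int × List Int :=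
  match pairwise_path with
  | [] => ([], [0, 0])
  | p0 :: rest =>
    let g := rest.foldl pvBGroup ([], [p0])
    let runs := g.1 ++ [g.2]
    let st := runs.foldl pvBFlat ([], [0])
    (st.1, st.2 ++ [(st.1.length : Int)])

-- ===== PRECONDITION & SPEC =====
def Spec_linearize_path_py (pairwise_path : List (Int × Int)) (out : List Int × List Int) : Prop := out = linearize_path_py_alt pairwise_path
instance (pairwise_path : List (Int × Int)) (out : List Int × List Int) : Decidable (Spec_linearize_path_py pairwise_path out) := by unfold Spec_linearize_path_py; infer_instance

-- ===== CLAIM (what is proved, stated in full; the proofs are below) =====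
def Claim_equal_linearize_path_py : Prop := ∀ (pairwise_path : List (Int × Int)), Dom_linearize_path_py pairwise_path → Spec_linearize_path_py pairwise_path (linearize_path_py pairwise_path)

-- ===== LEMMAS AND PROOFS =====

-- last of the mapped stops equals the snd of the run's last pair
theorem pvSndLast (q : Int × Int) (qs : List (Int × Int)) :
    (q.2 :: qs.map Prod.snd).getLast? = ((q :: qs).getLast?).map Prod.snd := by
  induction qs generalizing q with
  | nil => rfl
  | cons r rs ih => simpa [List.getLast?_cons_cons] using ih r

-- the last element of the flattened run is the run's last stop
theorem pvBFlat_getLast? (st : List Int × List Int) (q : Int × Int) (qs : List (Int × Int)) :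
    (pvBFlat st (q :: qs)).1.getLast? = ((q :: qs).getLast?).map Prod.snd := by
  cases hl : (q.2 :: qs.map Prod.snd).getLast? with
  | none => simp at hl
  | some v => simp [pvBFlat, List.getLast?_append, ← pvSndLast, hl]

theorem pvBFlat_append_pair (st : List Int × List Int) (q p : Int × Int) (qs : List (Int × Int)) :
    pvBFlat st (q :: (qs ++ [p])) = ((pvBFlat st (q :: qs)).1 ++ [p.2], (pvBFlat st (q :: qs)).2) := by
  simp [pvBFlat]

-- the main invariant: A's fold state equals the rendering of B's grouping state
theorem pv_inv (rest : List (Int × Int)) :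
    ∀ (runs : List (List (Int × Int))) (q : Int × Int) (qs : List (Int × Int)),
    rest.foldl pvAStep (pvBFlat (runs.foldl pvBFlat ([], [0])) (q :: qs)) =
      (let g := rest.foldl pvBGroup (runs, q :: qs)
       pvBFlat (g.1.foldl pvBFlat ([], [0])) g.2) := by
  induction rest with
  | nil => intro runs q qs; rfl
  | cons p rest ih =>
    intro runs q qs
    by_cases h : some p.1 = ((q :: qs).getLast?).map Prod.snd
    · -- continuity: the pair extends the current run
      have hA : pvAStep (pvBFlat (runs.foldl pvBFlat ([], [0])) (q :: qs)) p
          = pvBFlat (runs.foldl pvBFlat ([], [0])) (q :: (qs ++ [p])) := by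
        rw [pvBFlat_append_pair]
        simp [pvAStep, PySem.List.pyGet?_neg_one, pvBFlat_getLast?, ← h]
      have hB : pvBGroup (runs, q :: qs) p = (runs, q :: (qs ++ [p])) := by
        simp [pvBGroup, h]
      simp only [List.foldl_cons, hA, hB]
      exact ih runs q (qs ++ [p])
    · -- break: close the current run and start a new one
      have hA : pvAStep (pvBFlat (runs.foldl pvBFlat ([], [0])) (q :: qs)) p
          = pvBFlat ((runs ++ [q :: qs]).foldl pvBFlat ([], [0])) [p] := by
        rw [List.foldl_append]
        simp only [List.foldl_cons, List.foldl_nil]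
        rw [show ([p] : List (Int × Int)) = p :: [] from rfl]
        simp only [pvAStep, PySem.List.pyGet?_neg_one, pvBFlat_getLast?]
        rw [if_pos (by simpa using (Ne.symm h))]
        simp [pvBFlat]
      have hB : pvBGroup (runs, q :: qs) p = (runs ++ [q :: qs], [p]) := by
        simp [pvBGroup, h]
      simp only [List.foldl_cons, hA, hB]
      exact ih (runs ++ [q :: qs]) p []

-- ===== VERDICT (by name: the statement is the Claim_ definition above) =====
theorem linearize_path_py_spec : Claim_equal_linearize_path_py := by
  intro pairwise_path _
  unfold Spec_linearize_path_py
  cases pairwise_path with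
  | nil => rfl
  | cons p0 rest =>
    show linearize_path_py (p0 :: rest) = linearize_path_py_alt (p0 :: rest)
    unfold linearize_path_py linearize_path_py_alt
    simp only [List.drop_succ_cons, List.drop_zero, List.foldl_append, List.foldl_cons,
      List.foldl_nil]
    have h0 : (([p0.1, p0.2], [(0 : Int)]) : List Int × List Int)
        = pvBFlat (List.foldl pvBFlat ([], [0]) []) (p0 :: []) := by
      simp [pvBFlat]
    rw [h0, pv_inv rest [] p0 []]
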